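-- pv_equiv track=rewrite | github.com/Vincero1023/joe_coding | projects/Keyword_Forge/app/selector/serp_summary.py | _resolve_source_bucket
-- ===== SOURCE A (Python) =====
-- def _resolve_source_bucket(domain: str) -> str:
--     safe_domain = str(domain or "").lower()
--     if any(token in safe_domain for token in ("blog.", "post.", "cafe.", "tistory.", "brunch.")):
--         return "blog"
--     if any(token in safe_domain for token in ("go.kr", "or.kr", "ac.kr", "terms.naver.com", "kin.naver.com")):
--         return "official"
--     if any(token in safe_domain for token in ("shopping", "store", "smartstore", "coupang", "11st", "gmarket", "auction")):
--         return "commerce"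
--     if "news" in safe_domain:
--         return "news"
--     return "external"
-- ===== SOURCE B (Python) =====
-- # Different algorithm: instead of searching the domain once per token (20 substring
-- # searches), scan the lowercased domain position-by-position and probe a hash table of
-- # tokens (keyed by the few distinct token lengths); collect the set of matched buckets,
-- # then return the highest-priority matched bucket.
-- _TOKEN_BUCKET = {
--     "blog.": "blog", "post.": "blog", "cafe.": "blog", "tistory.": "blog", "brunch.": "blog",
--     "go.kr": "official", "or.kr": "official", "ac.kr": "official",
--     "terms.naver.com": "official", "kin.naver.com": "official",
--     "shopping": "commerce", "store": "commerce", "smartstore": "commerce",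
--     "coupang": "commerce", "11st": "commerce", "gmarket": "commerce", "auction": "commerce",
--     "news": "news",
-- }
-- _LENS = (4, 5, 7, 8, 10, 13, 15)  # the distinct token lengths
--
--
-- def _resolve_source_bucket(domain: str) -> str:
--     safe_domain = str(domain or "").lower()
--     matched = set()
--     for i in range(len(safe_domain)):
--         for length in _LENS:
--             bucket = _TOKEN_BUCKET.get(safe_domain[i:i + length])
--             if bucket is not None:
--                 matched.add(bucket)
--     for bucket in ("blog", "official", "commerce", "news"):
--         if bucket in matched:
--             return bucket
--     return "external"
-- ===== Notes on version B (the rewrite author's own statement) =====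
-- stated objective: alternative
-- what changed: Instead of running one substring search over the domain per token (20 scans in priority order), B makes a single position-by-position scan of the domain, probing a token->bucket hash table with the slice at each of the 7 distinct token lengths, collects the set of matched buckets, and finally returns the highest-priority matched bucket.
import Mathlib
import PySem

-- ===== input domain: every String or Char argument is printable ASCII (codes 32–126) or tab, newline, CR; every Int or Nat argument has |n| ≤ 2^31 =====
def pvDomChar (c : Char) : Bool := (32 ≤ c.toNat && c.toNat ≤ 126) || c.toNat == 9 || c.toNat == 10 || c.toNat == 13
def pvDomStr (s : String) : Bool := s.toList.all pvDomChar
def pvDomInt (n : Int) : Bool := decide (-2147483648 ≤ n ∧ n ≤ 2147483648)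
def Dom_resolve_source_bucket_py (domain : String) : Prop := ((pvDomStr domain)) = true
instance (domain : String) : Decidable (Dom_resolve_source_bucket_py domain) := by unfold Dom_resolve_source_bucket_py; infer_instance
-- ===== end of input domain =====

-- B replaces A's per-token substring searches by a single position-by-position scan of the
-- domain probing a token->bucket table at the distinct token lengths, collecting the set of
-- matched buckets and returning the highest-priority one (objective: alternative algorithm).


-- ===== PORT A =====
def resolve_source_bucket_py (domain : String) : String :=
  let safe_domain := PySem.Str.lower domain
  if ["blog.", "post.", "cafe.", "tistory.", "brunch."].any (fun token => PySem.Str.isIn token safe_domain) then "blog"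
  else if ["go.kr", "or.kr", "ac.kr", "terms.naver.com", "kin.naver.com"].any (fun token => PySem.Str.isIn token safe_domain) then "official"
  else if ["shopping", "store", "smartstore", "coupang", "11st", "gmarket", "auction"].any (fun token => PySem.Str.isIn token safe_domain) then "commerce"
  else if PySem.Str.isIn "news" safe_domain then "news"
  else "external"

-- ===== PORT B =====
-- B-side helper: the token -> bucket table (_TOKEN_BUCKET in Source B)
def pvTokenBucket : PySem.Dict String String := PySem.Dict.mk
  [("blog.", "blog"), ("post.", "blog"), ("cafe.", "blog"), ("tistory.", "blog"), ("brunch.", "blog"),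
   ("go.kr", "official"), ("or.kr", "official"), ("ac.kr", "official"),
   ("terms.naver.com", "official"), ("kin.naver.com", "official"),
   ("shopping", "commerce"), ("store", "commerce"), ("smartstore", "commerce"),
   ("coupang", "commerce"), ("11st", "commerce"), ("gmarket", "commerce"), ("auction", "commerce"),
   ("news", "news")]

-- B-side helper: the distinct token lengths (_LENS in Source B)
def pvLens : List Int := [4, 5, 7, 8, 10, 13, 15]

-- B-side helper: the set of buckets matched somewhere in safe_domain (the scanning loop of Source B)
def pvMatched (safe_domain : String) : PySem.Set String :=
  (PySem.List.pyRange 0 (PySem.Str.len safe_domain) 1).foldl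
    (fun matched i =>
      pvLens.foldl
        (fun matched length =>
          match pvTokenBucket.get? (PySem.Str.slice safe_domain (some i) (some (i + length))) with
          | some bucket => PySem.Set.add matched bucket
          | none => matched) matched) PySem.Set.empty

def resolve_source_bucket_py_alt (domain : String) : String :=
  let safe_domain := PySem.Str.lower domain
  let matched := pvMatched safe_domain
  (["blog", "official", "commerce", "news"].find? (fun bucket => PySem.Set.contains matched bucket)).getD "external"

-- ===== PRECONDITION & SPEC =====
def Spec_resolve_source_bucket_py (domain : String) (out : String) : Prop := out = resolve_source_bucket_py_alt domain
instance (domain : String) (out : String) : Decidable (Spec_resolve_source_bucket_py domain out) := by unfold Spec_resolve_source_bucket_py; infer_instance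

-- ===== CLAIM (what is proved, stated in full; the proofs are below) =====
def Claim_equal_resolve_source_bucket_py : Prop := ∀ (domain : String), Dom_resolve_source_bucket_py domain → Spec_resolve_source_bucket_py domain (resolve_source_bucket_py domain)

-- ===== LEMMAS AND PROOFS =====

-- membership in a fold that conditionally adds f y to the set
theorem pv_mem_foldl_add {α : Type} (f : α → Option String) (l : List α)
    (m : PySem.Set String) (x : String) :
    x ∈ l.foldl (fun m y => match f y with | some b => PySem.Set.add m b | none => m) m ↔
      x ∈ m ∨ ∃ y ∈ l, f y = some x := by
  induction l generalizing m with
  | nil => simp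
  | cons a t ih =>
    simp only [List.foldl_cons, List.mem_cons]
    cases h : f a with
    | none =>
      rw [ih]
      constructor
      · rintro (hm | ⟨y, hy, hfy⟩)
        · exact Or.inl hm
        · exact Or.inr ⟨y, Or.inr hy, hfy⟩
      · rintro (hm | ⟨y, (rfl | hy), hfy⟩)
        · exact Or.inl hm
        · rw [h] at hfy; cases hfy
        · exact Or.inr ⟨y, hy, hfy⟩
    | some b =>
      rw [ih]
      simp only [PySem.Set.mem_add]
      constructor
      · rintro ((hm | rfl) | ⟨y, hy, hfy⟩)
        · exact Or.inl hm
        · exact Or.inr ⟨a, Or.inl rfl, h⟩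
        · exact Or.inr ⟨y, Or.inr hy, hfy⟩
      · rintro (hm | ⟨y, (rfl | hy), hfy⟩)
        · exact Or.inl (Or.inl hm)
        · rw [h] at hfy; exact Or.inl (Or.inr (Option.some.inj hfy).symm)
        · exact Or.inr ⟨y, hy, hfy⟩

-- membership in a fold whose step satisfies a membership law
theorem pv_mem_foldl_step {α : Type} (step : PySem.Set String → α → PySem.Set String)
    (P : α → String → Prop)
    (hstep : ∀ m y x, x ∈ step m y ↔ x ∈ m ∨ P y x)
    (l : List α) (m : PySem.Set String) (x : String) :
    x ∈ l.foldl step m ↔ x ∈ m ∨ ∃ y ∈ l, P y x := by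
  induction l generalizing m with
  | nil => simp
  | cons a t ih =>
    simp only [List.foldl_cons, List.mem_cons]
    rw [ih, hstep]
    constructor
    · rintro ((hm | hp) | ⟨y, hy, hP⟩)
      · exact Or.inl hm
      · exact Or.inr ⟨a, Or.inl rfl, hp⟩
      · exact Or.inr ⟨y, Or.inr hy, hP⟩
    · rintro (hm | ⟨y, (rfl | hy), hP⟩)
      · exact Or.inl (Or.inl hm)
      · exact Or.inl (Or.inr hP)
      · exact Or.inr ⟨y, hy, hP⟩

-- get? = some on a literal dict implies the pair is in its item list
theorem pv_get?_mem {κ ν : Type} [BEq κ] (l : List (κ × ν)) (k : κ) (v : ν)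
    (h : (PySem.Dict.mk l).get? k = some v) : ∃ k', (k' == k) = true ∧ (k', v) ∈ l := by
  induction l with
  | nil => simp [PySem.Dict.get?] at h
  | cons hd tl ih =>
    obtain ⟨a, w⟩ := hd
    rw [PySem.Dict.get?_mk_cons] at h
    by_cases hc : (a == k) = true
    · rw [if_pos hc] at h
      obtain rfl : w = v := Option.some.inj h
      exact ⟨a, hc, List.mem_cons_self⟩
    · rw [if_neg hc] at h
      obtain ⟨k', hk', hm⟩ := ih h
      exact ⟨k', hk', List.mem_cons_of_mem _ hm⟩

theorem pvLens_nonneg : ∀ L ∈ pvLens, 0 ≤ L := by decide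

-- a token known to be in the table and occurring in safe_domain is found by the scan
theorem pv_token_found (safe : String) (t b : String)
    (ht : pvTokenBucket.get? t = some b)
    (hL : (t.toList.length : Int) ∈ pvLens)
    (hne : t.toList ≠ [])
    (hin : PySem.Str.isIn t safe = true) :
    ∃ i ∈ PySem.List.pyRange 0 (PySem.Str.len safe) 1,
      ∃ L ∈ pvLens, pvTokenBucket.get? (PySem.Str.slice safe (some i) (some (i + L))) = some b := by
  have hinf : t.toList <:+: safe.toList := (PySem.Str.isIn_iff_infix t safe).mp hin
  have hdrop : ∃ j, t.toList <+: List.drop j safe.toList := by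
    have := (PySem.Chars.exists_prefix_drop_iff_isIn t.toList safe.toList).mpr
    apply this
    rw [PySem.Chars.isIn_iff_infix]; exact hinf
  obtain ⟨j, hj⟩ := hdrop
  -- wlog j < length
  have hjlt : j < safe.toList.length := by
    by_contra hge
    rw [not_lt] at hge
    rw [List.drop_eq_nil_of_le hge] at hj
    exact hne (List.prefix_nil.mp hj)
  refine ⟨(j : Int), ?_, (t.toList.length : Int), hL, ?_⟩
  · rw [PySem.List.mem_pyRange_one]
    constructor
    · exact Int.natCast_nonneg j
    · rw [PySem.Str.len_eq]
      exact_mod_cast hjlt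
  · have hslice : (PySem.Str.slice safe (some (j : Int)) (some ((j : Int) + (t.toList.length : Int)))) = t := by
      rw [← String.toList_inj, PySem.Str.toList_slice, PySem.Chars.slice_eq_listSlice,
        PySem.List.slice_natCast_add]
      exact ((List.prefix_iff_eq_take.mp hj)).symm
    rw [hslice, ht]

-- characterisation of the matched set
theorem pv_mem_matched (safe : String) (b : String) :
    b ∈ pvMatched safe ↔ ∃ t, (t, b) ∈ pvTokenBucket.items ∧ PySem.Str.isIn t safe = true := by
  unfold pvMatched
  rw [pv_mem_foldl_step _
    (fun i x => ∃ L ∈ pvLens,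
      pvTokenBucket.get? (PySem.Str.slice safe (some i) (some (i + L))) = some x)
    (fun m i x => pv_mem_foldl_add
      (fun L => pvTokenBucket.get? (PySem.Str.slice safe (some i) (some (i + L)))) pvLens m x)]
  simp only [PySem.Set.empty, List.not_mem_nil, false_or]
  constructor
  · rintro ⟨i, hi, L, hLmem, hget⟩
    obtain ⟨k', hk', hm⟩ := pv_get?_mem _ _ _ hget
    have hkk : k' = PySem.Str.slice safe (some i) (some (i + L)) := by
      exact eq_of_beq hk'
    refine ⟨k', hm, ?_⟩
    -- the slice is an infix of safe
    rw [PySem.Str.isIn_iff_infix, hkk, PySem.Str.toList_slice, PySem.Chars.slice_eq_listSlice]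
    have h0i : 0 ≤ i := (PySem.List.mem_pyRange_one.mp hi).1
    have h0L : 0 ≤ L := pvLens_nonneg L hLmem
    rw [PySem.List.slice_toNat _ h0i (by omega)]
    exact ((List.take_prefix _ _).isInfix).trans (List.drop_suffix _ _).isInfix
  · rintro ⟨t, hmem, hin⟩
    have hfacts : pvTokenBucket.get? t = some b ∧ ((t.toList.length : Int) ∈ pvLens) ∧ t.toList ≠ [] := by
      fin_cases hmem <;> exact ⟨by decide, by decide, by decide⟩
    obtain ⟨i, hi, L, hLmem, hget⟩ :=
      pv_token_found safe t b hfacts.1 hfacts.2.1 hfacts.2.2 hin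
    exact ⟨i, hi, L, hLmem, hget⟩

-- Set.contains agrees with membership
theorem pv_contains_iff (m : PySem.Set String) (x : String) :
    PySem.Set.contains m x = true ↔ x ∈ m := by
  simp [PySem.Set.contains]

-- concrete bucket characterisations
theorem pv_blog_iff (safe : String) :
    PySem.Set.contains (pvMatched safe) "blog" =
      (["blog.", "post.", "cafe.", "tistory.", "brunch."].any (fun token => PySem.Str.isIn token safe)) := by
  rcases hb : (["blog.", "post.", "cafe.", "tistory.", "brunch."].any (fun token => PySem.Str.isIn token safe)) with _ | _
  · rw [Bool.eq_false_iff]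
    intro hc
    obtain ⟨t, hmem, hin⟩ := (pv_mem_matched safe "blog").mp ((pv_contains_iff _ _).mp hc)
    simp only [pvTokenBucket, List.mem_cons, List.not_mem_nil, or_false, Prod.mk.injEq] at hmem
    simp at hmem
    rcases hmem with rfl | rfl | rfl | rfl | rfl <;> simp_all
  · rw [pv_contains_iff, pv_mem_matched]
    simp only [List.any_eq_true] at hb
    obtain ⟨t, hmem, hin⟩ := hb
    fin_cases hmem <;> exact ⟨_, by decide, hin⟩

theorem pv_official_iff (safe : String) :
    PySem.Set.contains (pvMatched safe) "official" =
      (["go.kr", "or.kr", "ac.kr", "terms.naver.com", "kin.naver.com"].any (fun token => PySem.Str.isIn token safe)) := by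
  rcases hb : (["go.kr", "or.kr", "ac.kr", "terms.naver.com", "kin.naver.com"].any (fun token => PySem.Str.isIn token safe)) with _ | _
  · rw [Bool.eq_false_iff]
    intro hc
    obtain ⟨t, hmem, hin⟩ := (pv_mem_matched safe "official").mp ((pv_contains_iff _ _).mp hc)
    simp only [pvTokenBucket, List.mem_cons, List.not_mem_nil, or_false, Prod.mk.injEq] at hmem
    simp at hmem
    rcases hmem with rfl | rfl | rfl | rfl | rfl <;> simp_all
  · rw [pv_contains_iff, pv_mem_matched]
    simp only [List.any_eq_true] at hb
    obtain ⟨t, hmem, hin⟩ := hb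
    fin_cases hmem <;> exact ⟨_, by decide, hin⟩

theorem pv_commerce_iff (safe : String) :
    PySem.Set.contains (pvMatched safe) "commerce" =
      (["shopping", "store", "smartstore", "coupang", "11st", "gmarket", "auction"].any (fun token => PySem.Str.isIn token safe)) := by
  rcases hb : (["shopping", "store", "smartstore", "coupang", "11st", "gmarket", "auction"].any (fun token => PySem.Str.isIn token safe)) with _ | _
  · rw [Bool.eq_false_iff]
    intro hc
    obtain ⟨t, hmem, hin⟩ := (pv_mem_matched safe "commerce").mp ((pv_contains_iff _ _).mp hc)
    simp only [pvTokenBucket, List.mem_cons, List.not_mem_nil, or_false, Prod.mk.injEq] at hmem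
    simp at hmem
    rcases hmem with rfl | rfl | rfl | rfl | rfl | rfl | rfl <;> simp_all
  · rw [pv_contains_iff, pv_mem_matched]
    simp only [List.any_eq_true] at hb
    obtain ⟨t, hmem, hin⟩ := hb
    fin_cases hmem <;> exact ⟨_, by decide, hin⟩

theorem pv_news_iff (safe : String) :
    PySem.Set.contains (pvMatched safe) "news" = PySem.Str.isIn "news" safe := by
  rcases hb : PySem.Str.isIn "news" safe with _ | _
  · rw [Bool.eq_false_iff]
    intro hc
    obtain ⟨t, hmem, hin⟩ := (pv_mem_matched safe "news").mp ((pv_contains_iff _ _).mp hc)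
    simp only [pvTokenBucket, List.mem_cons, List.not_mem_nil, or_false, Prod.mk.injEq] at hmem
    simp at hmem
    subst hmem
    simp_all
  · rw [pv_contains_iff, pv_mem_matched]
    exact ⟨"news", by decide, hb⟩

-- ===== VERDICT (by name: the statement is the Claim_ definition above) =====
theorem resolve_source_bucket_py_spec : Claim_equal_resolve_source_bucket_py := by
  intro domain _
  unfold Spec_resolve_source_bucket_py resolve_source_bucket_py resolve_source_bucket_py_alt
  simp only [List.find?, pv_blog_iff, pv_official_iff, pv_commerce_iff, pv_news_iff]
  split_ifs with h1 h2 h3 h4 <;> simp only [Bool.not_eq_true] at * <;> simp only [*] <;> rfl
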